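-- pv_equiv track=rewrite | github.com/SukruEraslan/sta | sta-ds/sta-ds-custom-participanteventbased.py | calculateTotalNumberDurationofFixationsandNSV
-- ===== SOURCE A (Python) =====
-- def calculateTotalNumberDurationofFixationsandNSV(AoIList, Sequences):
--     for x in range(0, len(AoIList)):
--         duration = 0
--         counter = 0
--         totalNSV = 0
--
--         flag = 0
--         keys = list(Sequences.keys())
--         for y in range(0, len(keys)):
--             for k in range(0, len(Sequences[keys[y]])):
--                 if Sequences[keys[y]][k][0:2] == AoIList[x]:
--                     counter = counter + Sequences[keys[y]][k][2]
--                     duration = duration + Sequences[keys[y]][k][3]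
--                     totalNSV = totalNSV + Sequences[keys[y]][k][4]
--                     flag = flag + 1
--
--         AoIList[x] = AoIList[x] + [counter] + [duration] + [totalNSV] + [flag]
--
--     return AoIList
-- ===== SOURCE B (Python) =====
-- def calculateTotalNumberDurationofFixationsandNSV(AoIList, Sequences):
--     # Single pass over all fixation events, bucketing sums by the event's
--     # first two fields; incomplete records (fewer than 5 fields) are ignored.
--     totals = {}
--     for events in Sequences.values():
--         for e in events:
--             if len(e) >= 5:
--                 key = tuple(e[:2])
--                 c, d, n, f = totals.get(key, (0, 0, 0, 0))
--                 totals[key] = (c + e[2], d + e[3], n + e[4], f + 1)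
--     AoIList[:] = [aoi + list(totals.get(tuple(aoi), (0, 0, 0, 0)))
--                   for aoi in AoIList]
--     return AoIList
-- ===== Notes on version B (the rewrite author's own statement) =====
-- stated objective: faster
-- what changed: B replaces A's per-AoI rescan of every event (triple nested loop) by one pass that buckets sums in a dict keyed by the event's first two fields, then an O(1) lookup per AoI; Pre_ excludes inputs where some event whose first two fields match an AoI has fewer than 5 fields (A raises IndexError there) and assoc lists with duplicate keys, which a Python dict cannot represent.
import Mathlib
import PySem

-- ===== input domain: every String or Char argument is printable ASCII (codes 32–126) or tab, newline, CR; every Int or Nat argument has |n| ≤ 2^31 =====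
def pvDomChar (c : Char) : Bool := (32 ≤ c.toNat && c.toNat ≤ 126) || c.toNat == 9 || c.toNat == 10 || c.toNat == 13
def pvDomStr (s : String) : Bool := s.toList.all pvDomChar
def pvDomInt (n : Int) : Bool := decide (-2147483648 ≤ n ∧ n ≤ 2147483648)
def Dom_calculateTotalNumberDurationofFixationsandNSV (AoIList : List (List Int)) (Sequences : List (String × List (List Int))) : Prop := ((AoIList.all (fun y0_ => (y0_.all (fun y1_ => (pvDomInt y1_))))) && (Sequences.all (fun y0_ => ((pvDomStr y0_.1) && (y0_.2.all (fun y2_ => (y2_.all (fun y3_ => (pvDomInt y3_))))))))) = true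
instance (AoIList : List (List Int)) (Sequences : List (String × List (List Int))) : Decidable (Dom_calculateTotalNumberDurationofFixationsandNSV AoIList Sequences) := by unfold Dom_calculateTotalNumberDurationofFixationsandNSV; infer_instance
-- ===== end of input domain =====

-- B replaces A's per-AoI rescan of all events by one bucketing pass over the events
-- plus one lookup per AoI (return-value equivalence; both mutate AoIList in place in Python).

-- ===== PORT A =====
def calculateTotalNumberDurationofFixationsandNSV (AoIList : List (List Int)) (Sequences : List (String × List (List Int))) : List (List Int) :=
  (PySem.List.pyRange 0 (AoIList.length : Int) 1).foldl (fun acc x =>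
    let aoi := PySem.List.pyGetD acc x []
    let keys := Sequences.map Prod.fst
    let s := (PySem.List.pyRange 0 (keys.length : Int) 1).foldl (fun s y =>
      let key := PySem.List.pyGetD keys y ""
      let evs := (PySem.Dict.mk Sequences).getD key []
      (PySem.List.pyRange 0 (evs.length : Int) 1).foldl (fun (s : Int × Int × Int × Int) k =>
        let e := PySem.List.pyGetD evs k []
        if PySem.List.slice e (some 0) (some 2) = aoi then
          (s.1 + PySem.List.pyGetD e 2 0, s.2.1 + PySem.List.pyGetD e 3 0,
           s.2.2.1 + PySem.List.pyGetD e 4 0, s.2.2.2 + 1)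
        else s) s) ((0 : Int), (0 : Int), (0 : Int), (0 : Int))
    PySem.List.pySetD acc x (aoi ++ [s.1] ++ [s.2.1] ++ [s.2.2.1] ++ [s.2.2.2])) AoIList

-- ===== PORT B =====
def calculateTotalNumberDurationofFixationsandNSV_alt (AoIList : List (List Int)) (Sequences : List (String × List (List Int))) : List (List Int) :=
  let totals : PySem.Dict (List Int) (Int × Int × Int × Int) :=
    (Sequences.map Prod.snd).foldl (fun d events =>
      events.foldl (fun d e =>
        if 5 ≤ e.length then
          let key := PySem.List.slice e (some 0) (some 2)
          let t := d.getD key (0, 0, 0, 0)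
          d.insert key (t.1 + PySem.List.pyGetD e 2 0, t.2.1 + PySem.List.pyGetD e 3 0,
                        t.2.2.1 + PySem.List.pyGetD e 4 0, t.2.2.2 + 1)
        else d) d) PySem.Dict.empty
  AoIList.map (fun aoi =>
    let t := totals.getD aoi (0, 0, 0, 0)
    aoi ++ [t.1, t.2.1, t.2.2.1, t.2.2.2])

-- ===== PRECONDITION & SPEC =====
-- Pre_ excludes (a) inputs where some event whose first two fields equal an AoI has
-- fewer than 5 fields — A raises IndexError there — and (b) association lists with
-- duplicate keys, which a Python dict cannot represent (representation artefact).
def Pre_calculateTotalNumberDurationofFixationsandNSV (AoIList : List (List Int)) (Sequences : List (String × List (List Int))) : Prop :=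
  (Sequences.map Prod.fst).Nodup ∧
  ∀ p ∈ Sequences, ∀ e ∈ p.2, PySem.List.slice e (some 0) (some 2) ∈ AoIList → 5 ≤ e.length
instance (AoIList : List (List Int)) (Sequences : List (String × List (List Int))) : Decidable (Pre_calculateTotalNumberDurationofFixationsandNSV AoIList Sequences) := by unfold Pre_calculateTotalNumberDurationofFixationsandNSV; infer_instance
def pvWitness_calculateTotalNumberDurationofFixationsandNSV : List (List Int) × (List (String × List (List Int))) :=
  ([[1, 2], [3, 4]], [("p1", [[1, 2, 1, 10, 5], [0, 0, 2, 20, 6]]), ("p2", [[1, 2, 3, 30, 7]])])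

def Spec_calculateTotalNumberDurationofFixationsandNSV (AoIList : List (List Int)) (Sequences : List (String × List (List Int))) (out : List (List Int)) : Prop := out = calculateTotalNumberDurationofFixationsandNSV_alt AoIList Sequences
instance (AoIList : List (List Int)) (Sequences : List (String × List (List Int))) (out : List (List Int)) : Decidable (Spec_calculateTotalNumberDurationofFixationsandNSV AoIList Sequences out) := by unfold Spec_calculateTotalNumberDurationofFixationsandNSV; infer_instance

-- ===== CLAIM (what is proved, stated in full; the proofs are below) =====
def Claim_equal_calculateTotalNumberDurationofFixationsandNSV : Prop := ∀ (AoIList : List (List Int)) (Sequences : List (String × List (List Int))), Dom_calculateTotalNumberDurationofFixationsandNSV AoIList Sequences → Pre_calculateTotalNumberDurationofFixationsandNSV AoIList Sequences → Spec_calculateTotalNumberDurationofFixationsandNSV AoIList Sequences (calculateTotalNumberDurationofFixationsandNSV AoIList Sequences)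
-- ===== LEMMAS AND PROOFS =====

-- helpers naming the two step functions (definitionally the ports' loop bodies)
def pvAdd (s : Int × Int × Int × Int) (e : List Int) : Int × Int × Int × Int :=
  (s.1 + PySem.List.pyGetD e 2 0, s.2.1 + PySem.List.pyGetD e 3 0,
   s.2.2.1 + PySem.List.pyGetD e 4 0, s.2.2.2 + 1)

def pvStepA (aoi : List Int) (s : Int × Int × Int × Int) (e : List Int) : Int × Int × Int × Int :=
  if PySem.List.slice e (some 0) (some 2) = aoi then pvAdd s e else s

def pvStepB (d : PySem.Dict (List Int) (Int × Int × Int × Int)) (e : List Int) :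
    PySem.Dict (List Int) (Int × Int × Int × Int) :=
  if 5 ≤ e.length then
    d.insert (PySem.List.slice e (some 0) (some 2))
      (pvAdd (d.getD (PySem.List.slice e (some 0) (some 2)) (0, 0, 0, 0)) e)
  else d

-- A's per-AoI aggregation (the body of A's outer loop, as a function of the AoI)
def pvAggA (Sequences : List (String × List (List Int))) (aoi : List Int) : Int × Int × Int × Int :=
  (PySem.List.pyRange 0 (((Sequences.map Prod.fst).length : Nat) : Int) 1).foldl (fun s y =>
      let key := PySem.List.pyGetD (Sequences.map Prod.fst) y ""
      let evs := (PySem.Dict.mk Sequences).getD key []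
      (PySem.List.pyRange 0 ((evs.length : Nat) : Int) 1).foldl (fun (s : Int × Int × Int × Int) k =>
        let e := PySem.List.pyGetD evs k []
        if PySem.List.slice e (some 0) (some 2) = aoi then
          (s.1 + PySem.List.pyGetD e 2 0, s.2.1 + PySem.List.pyGetD e 3 0,
           s.2.2.1 + PySem.List.pyGetD e 4 0, s.2.2.2 + 1)
        else s) s) ((0 : Int), (0 : Int), (0 : Int), (0 : Int))

-- indices strictly below the length never touch an appended last element
theorem pvFoldSetFrozen {A : Type} (d : A) (f : A -> A) (a : A) (i : List Int) :
    ∀ (l : List A), (∀ x ∈ i, 0 ≤ x ∧ x < (l.length : Int)) →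
    (i.foldl (fun acc x => PySem.List.pySetD acc x (f (PySem.List.pyGetD acc x d))) (l ++ [a]))
      = i.foldl (fun acc x => PySem.List.pySetD acc x (f (PySem.List.pyGetD acc x d))) l ++ [a] := by
  induction i with
  | nil => intro l _; rfl
  | cons x i ih =>
    intro l hb
    obtain ⟨hx0, hxl⟩ := hb x (List.mem_cons_self ..)
    have hlt : x.toNat < l.length := by omega
    have hget : PySem.List.pyGetD (l ++ [a]) x d = PySem.List.pyGetD l x d := by
      rw [PySem.List.pyGetD_eq_getElem (l ++ [a]) d hx0 (by simp; omega),
          PySem.List.pyGetD_eq_getElem l d hx0 (by omega)]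
      exact List.getElem_append_left hlt
    have hset : ∀ v, PySem.List.pySetD (l ++ [a]) x v = PySem.List.pySetD l x v ++ [a] := by
      intro v
      rw [PySem.List.pySetD_of_nonneg (l ++ [a]) v hx0, PySem.List.pySetD_of_nonneg l v hx0]
      exact List.set_append_left _ _ hlt
    simp only [List.foldl_cons, hget, hset]
    exact ih _ (by intro y hy; simpa [PySem.List.length_pySetD] using hb y (List.mem_cons_of_mem _ hy))

-- 'for x in range(len(l)): l[x] = f(l[x])' is List.map f
theorem pvFoldSetMap {A : Type} (d : A) (f : A -> A) (l : List A) :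
    (PySem.List.pyRange 0 (l.length : Int) 1).foldl
      (fun acc x => PySem.List.pySetD acc x (f (PySem.List.pyGetD acc x d))) l = l.map f := by
  induction l using List.reverseRecOn with
  | nil => rfl
  | append_singleton l a ih =>
    have hrange : PySem.List.pyRange 0 (((l ++ [a]).length : Nat) : Int) 1
        = PySem.List.pyRange 0 (l.length : Int) 1 ++ [(l.length : Int)] := by
      have h := PySem.List.pyRange_one_succ_right (a := 0) (b := (l.length : Int)) (by positivity)
      rw [List.length_append]; push_cast; simpa using h
    rw [hrange, List.foldl_append]
    rw [pvFoldSetFrozen d f a _ l (by intro x hx; exact PySem.List.mem_pyRange_one.mp hx)]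
    rw [ih]
    have hlen : (l.map f).length = l.length := by simp
    simp only [List.foldl_cons, List.foldl_nil]
    have hget : PySem.List.pyGetD (l.map f ++ [a]) (l.length : Int) d = a := by
      rw [PySem.List.pyGetD_eq_getElem (l.map f ++ [a]) d (by positivity) (by simp)]
      simp [List.getElem_append_right, hlen]
    have hset : PySem.List.pySetD (l.map f ++ [a]) (l.length : Int) (f a) = l.map f ++ [f a] := by
      rw [PySem.List.pySetD_of_nonneg (l.map f ++ [a]) (f a) (by positivity)]
      rw [Int.toNat_natCast, ← hlen, List.set_append_right _ _ (by omega)]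
      simp
    rw [hget, hset]
    simp

-- A's nested scan for one AoI is a single fold over all events (distinct keys)
theorem pvAggA_eq (Sequences : List (String × List (List Int))) (aoi : List Int)
    (hnd : (Sequences.map Prod.fst).Nodup) :
    pvAggA Sequences aoi
      = ((Sequences.map Prod.snd).flatten).foldl (pvStepA aoi) (0, 0, 0, 0) := by
  have t1 : pvAggA Sequences aoi
      = (Sequences.map Prod.fst).foldl (fun acc key =>
          ((PySem.Dict.mk Sequences).getD key []).foldl (pvStepA aoi) acc) (0, 0, 0, 0) := by
    have h1 := PySem.List.foldl_pyRange_zero_pyGetD' (Sequences.map Prod.fst) ""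
      (fun (acc : Int × Int × Int × Int) key =>
        (PySem.List.pyRange 0 ((((PySem.Dict.mk Sequences).getD key []).length : Nat) : Int) 1).foldl
          (fun s k => pvStepA aoi s (PySem.List.pyGetD ((PySem.Dict.mk Sequences).getD key []) k []))
          acc) ((0 : Int), (0 : Int), (0 : Int), (0 : Int))
    refine Eq.trans h1 ?_
    refine PySem.List.foldl_congr_mem _ _ _ _ ?_
    intro acc key _
    exact PySem.List.foldl_pyRange_zero_pyGetD' _ [] (pvStepA aoi) acc
  rw [t1, List.foldl_map]
  rw [PySem.List.foldl_congr_mem Sequences _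
      (fun (s : Int × Int × Int × Int) p => p.2.foldl (pvStepA aoi) s) _
      (by
        intro acc p hp
        have hkeys : (PySem.Dict.mk Sequences).keys.Nodup := by
          simpa [PySem.Dict.keys] using hnd
        have hevs : (PySem.Dict.mk Sequences).getD p.1 [] = p.2 :=
          PySem.Dict.getD_of_mem_items _ (by simpa using hp) hkeys _
        rw [hevs])]
  rw [List.foldl_flatten, List.foldl_map]

-- B's bucket for one AoI equals A's filtered fold when matching events are complete
theorem pvBucket (aoi : List Int) (l : List (List Int)) :
    ∀ (d : PySem.Dict (List Int) (Int × Int × Int × Int)),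
    (∀ e ∈ l, PySem.List.slice e (some 0) (some 2) = aoi → 5 ≤ e.length) →
    (l.foldl pvStepB d).getD aoi (0, 0, 0, 0) = l.foldl (pvStepA aoi) (d.getD aoi (0, 0, 0, 0)) := by
  induction l with
  | nil => intro d _; rfl
  | cons e l ih =>
    intro d h
    have hl : ∀ e ∈ l, PySem.List.slice e (some 0) (some 2) = aoi → 5 ≤ e.length :=
      fun e' he' => h e' (List.mem_cons_of_mem _ he')
    simp only [List.foldl_cons]
    by_cases hm : PySem.List.slice e (some 0) (some 2) = aoi
    · have h5 : 5 ≤ e.length := h e (List.mem_cons_self ..) hm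
      rw [ih _ hl]
      simp [pvStepB, pvStepA, h5, hm, PySem.Dict.getD_insert_self]
    · rw [ih _ hl]
      have hd : (pvStepB d e).getD aoi (0, 0, 0, 0) = d.getD aoi (0, 0, 0, 0) := by
        unfold pvStepB
        split
        · exact PySem.Dict.getD_insert_of_ne d _ _ (fun hc => hm hc.symm)
        · rfl
      rw [hd]
      have hm' : PySem.List.slice e none (some 2) ≠ aoi := by simpa using hm
      simp [pvStepA, hm']

-- ===== VERDICT (by name: the statement is the Claim_ definition above) =====
theorem calculateTotalNumberDurationofFixationsandNSV_spec : Claim_equal_calculateTotalNumberDurationofFixationsandNSV := by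
  intro AoIList Sequences _ hpre
  obtain ⟨hnd, h5⟩ := hpre
  unfold Spec_calculateTotalNumberDurationofFixationsandNSV
  have hA : calculateTotalNumberDurationofFixationsandNSV AoIList Sequences
      = AoIList.map (fun aoi =>
          aoi ++ [(pvAggA Sequences aoi).1] ++ [(pvAggA Sequences aoi).2.1]
              ++ [(pvAggA Sequences aoi).2.2.1] ++ [(pvAggA Sequences aoi).2.2.2]) :=
    pvFoldSetMap [] (fun aoi =>
      aoi ++ [(pvAggA Sequences aoi).1] ++ [(pvAggA Sequences aoi).2.1]
          ++ [(pvAggA Sequences aoi).2.2.1] ++ [(pvAggA Sequences aoi).2.2.2]) AoIList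
  have hT : ((Sequences.map Prod.snd).foldl (fun d events => events.foldl pvStepB d)
        PySem.Dict.empty)
      = ((Sequences.map Prod.snd).flatten).foldl pvStepB PySem.Dict.empty :=
    (List.foldl_flatten).symm
  rw [hA]
  show _ = AoIList.map (fun aoi =>
      let t := ((Sequences.map Prod.snd).foldl (fun d events => events.foldl pvStepB d)
        PySem.Dict.empty).getD aoi (0, 0, 0, 0)
      aoi ++ [t.1, t.2.1, t.2.2.1, t.2.2.2])
  refine List.map_congr_left ?_
  intro aoi ha
  have hmatch : ∀ e ∈ (Sequences.map Prod.snd).flatten,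
      PySem.List.slice e (some 0) (some 2) = aoi → 5 ≤ e.length := by
    intro e he hm
    obtain ⟨evs, hevs, hee⟩ := List.mem_flatten.mp he
    obtain ⟨p, hp, rfl⟩ := List.mem_map.mp hevs
    exact h5 p hp e hee (hm ▸ ha)
  have hbucket := pvBucket aoi ((Sequences.map Prod.snd).flatten) PySem.Dict.empty hmatch
  rw [PySem.Dict.getD_empty] at hbucket
  simp only [hT, hbucket, pvAggA_eq Sequences aoi hnd]
  simp
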